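-- pv_equiv track=rewrite | github.com/TariAgentBenchmark/who_are_you | main.py | construct_uniform_windows_ph
-- ===== SOURCE A (Python) =====
-- from typing import Dict, Iterable, List, Optional, Tuple
--
-- def construct_uniform_windows_ph(start: int, div: int, end: int, window_size: int, overlap: int) -> List[Tuple[int, int]]:
--     step = window_size - overlap
--     seg_len = end - start
--     if seg_len <= window_size:
--         return []
--
--     center = div - window_size // 2
--     center = max(center, start)
--     center = min(center, end - window_size)
--     windows = [(int(center), int(center + window_size))]
--
--     left = center - step
--     while left >= start:
--         windows.insert(0, (int(left), int(left + window_size)))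
--         left -= step
--
--     right = center + step
--     while right + window_size <= end:
--         windows.append((int(right), int(right + window_size)))
--         right += step
--
--     return windows
-- ===== SOURCE B (Python) =====
-- def construct_uniform_windows_ph(start, div, end, window_size, overlap):
--     step = window_size - overlap
--     if end - start <= window_size:
--         return []
--     center = min(max(div - window_size // 2, start), end - window_size)
--     pos = center - step * ((center - start) // step)
--     windows = []
--     while pos + window_size <= end:
--         windows.append((int(pos), int(pos + window_size)))
--         pos += step
--     return windows
-- ===== Notes on version B (the rewrite author's own statement) =====
-- stated objective: alternative
-- what changed: Replaces A's center-anchored bidirectional expansion (a backward insert(0) loop plus a forward append loop) with one closed-form computation of the leftmost window start followed by a single forward sweep that emits the windows already in order.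
import Mathlib
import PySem

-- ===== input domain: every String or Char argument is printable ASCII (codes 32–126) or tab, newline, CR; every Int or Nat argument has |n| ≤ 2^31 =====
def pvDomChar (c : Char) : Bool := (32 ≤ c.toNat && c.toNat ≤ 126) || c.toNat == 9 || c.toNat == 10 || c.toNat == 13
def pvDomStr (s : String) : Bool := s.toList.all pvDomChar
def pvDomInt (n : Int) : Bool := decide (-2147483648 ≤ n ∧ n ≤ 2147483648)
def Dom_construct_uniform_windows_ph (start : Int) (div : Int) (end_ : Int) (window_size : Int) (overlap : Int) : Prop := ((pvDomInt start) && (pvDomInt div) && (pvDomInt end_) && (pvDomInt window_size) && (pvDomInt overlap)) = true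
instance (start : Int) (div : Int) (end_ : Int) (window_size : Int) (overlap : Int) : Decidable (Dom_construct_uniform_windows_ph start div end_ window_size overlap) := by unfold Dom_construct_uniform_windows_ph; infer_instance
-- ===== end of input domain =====

-- B replaces A's bidirectional expansion around the center (insert(0) backward loop + append
-- forward loop) by computing the leftmost window start in closed form and doing one forward sweep.

-- ===== PORT A =====
-- 'while left >= start: windows.insert(0, (left, left+window_size)); left -= step' (fuel guard for totality only)
def cuwA_left (start step window_size : Int) : Nat → Int → List (Int × Int) → List (Int × Int)
  | 0, _, acc => acc
  | fuel + 1, left, acc =>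
    if start ≤ left then
      cuwA_left start step window_size fuel (left - step) ((left, left + window_size) :: acc)
    else acc

-- 'while right + window_size <= end: windows.append((right, right+window_size)); right += step'
def cuwA_right (end_ step window_size : Int) : Nat → Int → List (Int × Int) → List (Int × Int)
  | 0, _, acc => acc
  | fuel + 1, right, acc =>
    if right + window_size ≤ end_ then
      cuwA_right end_ step window_size fuel (right + step) (acc ++ [(right, right + window_size)])
    else acc

def construct_uniform_windows_ph (start : Int) (div : Int) (end_ : Int) (window_size : Int) (overlap : Int) : List (Int × Int) :=
  let step := window_size - overlap
  let seg_len := end_ - start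
  if seg_len ≤ window_size then []
  else
    let center := div - PySem.Int.floordiv window_size 2
    let center := max center start
    let center := min center (end_ - window_size)
    let windows : List (Int × Int) := [(center, center + window_size)]
    let windows := cuwA_left start step window_size ((center - step - start).toNat + 1) (center - step) windows
    cuwA_right end_ step window_size ((end_ - window_size - (center + step)).toNat + 1) (center + step) windows

-- ===== PORT B =====
-- 'while pos + window_size <= end: windows.append((pos, pos+window_size)); pos += step'
def cuwB_fwd (end_ step window_size : Int) : Nat → Int → List (Int × Int) → List (Int × Int)
  | 0, _, acc => acc
  | fuel + 1, pos, acc =>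
    if pos + window_size ≤ end_ then
      cuwB_fwd end_ step window_size fuel (pos + step) (acc ++ [(pos, pos + window_size)])
    else acc

def construct_uniform_windows_ph_alt (start : Int) (div : Int) (end_ : Int) (window_size : Int) (overlap : Int) : List (Int × Int) :=
  let step := window_size - overlap
  if end_ - start ≤ window_size then []
  else
    let center := min (max (div - PySem.Int.floordiv window_size 2) start) (end_ - window_size)
    let pos := center - step * PySem.Int.floordiv (center - start) step
    cuwB_fwd end_ step window_size ((end_ - window_size - pos).toNat + 1) pos []

-- ===== PRECONDITION & SPEC =====
-- Pre_ excludes only inputs on which Python A never returns: when end - start > window_size and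
-- step = window_size - overlap ≤ 0, A's backward while-loop runs forever (B raises or loops too).
def Pre_construct_uniform_windows_ph (start : Int) (div : Int) (end_ : Int) (window_size : Int) (overlap : Int) : Prop :=
  end_ - start ≤ window_size ∨ 1 ≤ window_size - overlap
instance (start : Int) (div : Int) (end_ : Int) (window_size : Int) (overlap : Int) : Decidable (Pre_construct_uniform_windows_ph start div end_ window_size overlap) := by unfold Pre_construct_uniform_windows_ph; infer_instance

def pvWitness_construct_uniform_windows_ph : Int × Int × Int × Int × Int := (0, 2, 10, 4, 2)

def Spec_construct_uniform_windows_ph (start : Int) (div : Int) (end_ : Int) (window_size : Int) (overlap : Int) (out : List (Int × Int)) : Prop := out = construct_uniform_windows_ph_alt start div end_ window_size overlap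
instance (start : Int) (div : Int) (end_ : Int) (window_size : Int) (overlap : Int) (out : List (Int × Int)) : Decidable (Spec_construct_uniform_windows_ph start div end_ window_size overlap out) := by unfold Spec_construct_uniform_windows_ph; infer_instance

-- ===== CLAIM (what is proved, stated in full; the proofs are below) =====
def Claim_equal_construct_uniform_windows_ph : Prop := ∀ (start : Int) (div : Int) (end_ : Int) (window_size : Int) (overlap : Int), Dom_construct_uniform_windows_ph start div end_ window_size overlap → Pre_construct_uniform_windows_ph start div end_ window_size overlap → Spec_construct_uniform_windows_ph start div end_ window_size overlap (construct_uniform_windows_ph start div end_ window_size overlap)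

-- ===== LEMMAS AND PROOFS =====

-- accumulator normalization
theorem cuwA_left_acc (start step w : Int) : ∀ (fuel : Nat) (left : Int) (acc : List (Int × Int)),
    cuwA_left start step w fuel left acc = cuwA_left start step w fuel left [] ++ acc := by
  intro fuel
  induction fuel with
  | zero => intro left acc; simp [cuwA_left]
  | succ f ih =>
    intro left acc
    simp only [cuwA_left]
    split
    · rw [ih _ ((left, left + w) :: acc), ih _ [(left, left + w)]]; simp
    · simp

theorem cuwA_right_acc (end_ step w : Int) : ∀ (fuel : Nat) (pos : Int) (acc : List (Int × Int)),
    cuwA_right end_ step w fuel pos acc = acc ++ cuwA_right end_ step w fuel pos [] := by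
  intro fuel
  induction fuel with
  | zero => intro pos acc; simp [cuwA_right]
  | succ f ih =>
    intro pos acc
    simp only [cuwA_right]
    split
    · rw [ih _ (acc ++ [(pos, pos + w)]), ih _ ([] ++ [(pos, pos + w)])]; simp
    · simp

theorem cuwB_eq_cuwA_right (end_ step w : Int) : ∀ (fuel : Nat) (pos : Int) (acc : List (Int × Int)),
    cuwB_fwd end_ step w fuel pos acc = cuwA_right end_ step w fuel pos acc := by
  intro fuel
  induction fuel with
  | zero => intro pos acc; rfl
  | succ f ih =>
    intro pos acc
    simp only [cuwB_fwd, cuwA_right]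
    split
    · exact ih _ _
    · rfl

-- canonical (fuel-insensitive) forms
def canonF (end_ step w pos : Int) : List (Int × Int) :=
  cuwA_right end_ step w ((end_ - w - pos).toNat + 1) pos []

def canonL (start step w left : Int) : List (Int × Int) :=
  cuwA_left start step w ((left - start).toNat + 1) left []

theorem cuwA_right_stop (end_ step w : Int) : ∀ (fuel : Nat) (pos : Int), ¬ pos + w ≤ end_ →
    cuwA_right end_ step w fuel pos [] = [] := by
  intro fuel pos h
  cases fuel with
  | zero => rfl
  | succ f => simp only [cuwA_right, if_neg h]

theorem cuwA_right_fuel (end_ step w : Int) (hs : 1 ≤ step) :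
    ∀ (f1 : Nat), ∀ (f2 : Nat) (pos : Int), (end_ - w - pos).toNat < f1 → (end_ - w - pos).toNat < f2 →
    cuwA_right end_ step w f1 pos [] = cuwA_right end_ step w f2 pos [] := by
  intro f1
  induction f1 with
  | zero => intro f2 pos h1 _; omega
  | succ f ih =>
    intro f2 pos h1 h2
    cases f2 with
    | zero => omega
    | succ f2' =>
      simp only [cuwA_right]
      split
      · rename_i hc
        rw [cuwA_right_acc, cuwA_right_acc end_ step w f2']
        by_cases he : 1 ≤ end_ - w - pos
        · rw [ih f2' (pos + step) (by omega) (by omega)]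
        · rw [cuwA_right_stop end_ step w f (pos + step) (by omega),
              cuwA_right_stop end_ step w f2' (pos + step) (by omega)]
      · rfl

theorem canonF_pos (end_ step w pos : Int) (hs : 1 ≤ step) (hc : pos + w ≤ end_) :
    canonF end_ step w pos = (pos, pos + w) :: canonF end_ step w (pos + step) := by
  conv_lhs => unfold canonF
  simp only [cuwA_right, if_pos hc]
  rw [cuwA_right_acc]
  by_cases he : 1 ≤ end_ - w - pos
  · rw [cuwA_right_fuel end_ step w hs ((end_ - w - pos).toNat)
        ((end_ - w - (pos + step)).toNat + 1) (pos + step) (by omega) (by omega)]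
    simp [canonF]
  · rw [cuwA_right_stop end_ step w _ (pos + step) (by omega)]
    unfold canonF
    rw [cuwA_right_stop end_ step w _ (pos + step) (by omega)]
    simp

theorem cuwA_left_stop (start step w : Int) : ∀ (fuel : Nat) (left : Int), ¬ start ≤ left →
    cuwA_left start step w fuel left [] = [] := by
  intro fuel left h
  cases fuel with
  | zero => rfl
  | succ f => simp only [cuwA_left, if_neg h]

theorem cuwA_left_fuel (start step w : Int) (hs : 1 ≤ step) :
    ∀ (f1 : Nat), ∀ (f2 : Nat) (left : Int), (left - start).toNat < f1 → (left - start).toNat < f2 →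
    cuwA_left start step w f1 left [] = cuwA_left start step w f2 left [] := by
  intro f1
  induction f1 with
  | zero => intro f2 left h1 _; omega
  | succ f ih =>
    intro f2 left h1 h2
    cases f2 with
    | zero => omega
    | succ f2' =>
      simp only [cuwA_left]
      split
      · rename_i hc
        rw [cuwA_left_acc, cuwA_left_acc start step w f2']
        by_cases he : 1 ≤ left - start
        · rw [ih f2' (left - step) (by omega) (by omega)]
        · rw [cuwA_left_stop start step w f (left - step) (by omega),
              cuwA_left_stop start step w f2' (left - step) (by omega)]
      · rfl

theorem canonL_pos (start step w left : Int) (hs : 1 ≤ step) (hc : start ≤ left) :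
    canonL start step w left = canonL start step w (left - step) ++ [(left, left + w)] := by
  conv_lhs => unfold canonL
  simp only [cuwA_left, if_pos hc]
  rw [cuwA_left_acc]
  by_cases he : 1 ≤ left - start
  · rw [cuwA_left_fuel start step w hs ((left - start).toNat)
        ((left - step - start).toNat + 1) (left - step) (by omega) (by omega)]
    simp [canonL]
  · rw [cuwA_left_stop start step w _ (left - step) (by omega)]
    unfold canonL
    rw [cuwA_left_stop start step w _ (left - step) (by omega)]

theorem canonL_neg (start step w left : Int) (hc : ¬ start ≤ left) :
    canonL start step w left = [] := by
  unfold canonL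
  simp only [cuwA_left, if_neg hc]

-- the bridge: the forward sweep from the computed leftmost anchor equals A's
-- backward-collected left part followed by the forward part from the center
theorem merge (start end_ step w : Int) (hs : 1 ≤ step) :
    ∀ (n : Nat) (left : Int), (left - start).toNat ≤ n → start ≤ left → left + w ≤ end_ →
    canonF end_ step w (left - step * PySem.Int.floordiv (left - start) step)
      = canonL start step w (left - step) ++ canonF end_ step w left := by
  intro n
  induction n with
  | zero =>
    intro left hn hl hw
    have hlt : left - step < start := by omega
    have hq : PySem.Int.floordiv (left - start) step = 0 := by
      rw [PySem.Int.floordiv_eq_iff_of_pos (by omega)]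
      constructor <;> [skip; skip] <;> nlinarith
    rw [hq, canonL_neg start step w _ (by omega)]
    simp
  | succ n ih =>
    intro left hn hl hw
    by_cases hls : start ≤ left - step
    · set q' := PySem.Int.floordiv (left - step - start) step with hq'def
      have hq'spec : q' * step ≤ left - step - start ∧ left - step - start < (q' + 1) * step := by
        rw [hq'def]
        exact (PySem.Int.floordiv_eq_iff_of_pos (by omega)).mp rfl
      have hq : PySem.Int.floordiv (left - start) step = q' + 1 := by
        rw [PySem.Int.floordiv_eq_iff_of_pos (by omega)]
        constructor <;> nlinarith [hq'spec.1, hq'spec.2]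
      have hanchor : left - step * (q' + 1) = (left - step) - step * q' := by ring
      have ihh := ih (left - step) (by omega) hls (by omega)
      rw [hq, hanchor, ← hq'def] at *
      rw [ihh]
      rw [canonF_pos end_ step w (left - step) hs (by omega),
          canonL_pos start step w (left - step) hs hls]
      simp only [List.append_assoc, List.cons_append, List.nil_append]
      have : left - step + step = left := by ring
      rw [this]
    · have hq : PySem.Int.floordiv (left - start) step = 0 := by
        rw [PySem.Int.floordiv_eq_iff_of_pos (by omega)]
        constructor <;> nlinarith
      rw [hq, canonL_neg start step w _ hls]
      simp

-- ===== VERDICT (by name: the statement is the Claim_ definition above) =====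
theorem construct_uniform_windows_ph_spec : Claim_equal_construct_uniform_windows_ph := by
  intro start div end_ w overlap _ hpre
  unfold Spec_construct_uniform_windows_ph
  unfold construct_uniform_windows_ph construct_uniform_windows_ph_alt
  simp only []
  by_cases hseg : end_ - start ≤ w
  · simp [hseg]
  · have hs : 1 ≤ w - overlap := by
      rcases hpre with h | h
      · exact absurd h hseg
      · exact h
    simp only [if_neg hseg]
    set step := w - overlap with hstep
    set c0 := div - PySem.Int.floordiv w 2 with hc0
    set c := min (max c0 start) (end_ - w) with hc
    have hcl : start ≤ c := by
      have h1 : start ≤ max c0 start := le_max_right _ _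
      have h2 : start ≤ end_ - w := by omega
      exact le_min h1 h2
    have hcr : c + w ≤ end_ := by
      have : c ≤ end_ - w := min_le_right _ _
      omega
    -- A's side
    have hA : cuwA_left start step w ((c - step - start).toNat + 1) (c - step) [(c, c + w)]
        = canonL start step w (c - step) ++ [(c, c + w)] := by
      rw [cuwA_left_acc]; rfl
    rw [hA, cuwA_right_acc]
    have hR : cuwA_right end_ step w ((end_ - w - (c + step)).toNat + 1) (c + step) []
        = canonF end_ step w (c + step) := rfl
    rw [hR]
    -- B's side
    rw [cuwB_eq_cuwA_right]
    have hB : cuwA_right end_ step w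
        ((end_ - w - (c - step * PySem.Int.floordiv (c - start) step)).toNat + 1)
        (c - step * PySem.Int.floordiv (c - start) step) []
        = canonF end_ step w (c - step * PySem.Int.floordiv (c - start) step) := rfl
    rw [hB, merge start end_ step w hs ((c - start).toNat) c (le_refl _) hcl hcr]
    rw [canonF_pos end_ step w c hs hcr]
    simp
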